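-- pv_equiv track=rewrite | github.com/TourTerrible/Circuit-X | Test code/second.py | delete_repeated
-- ===== SOURCE A (Python) =====
-- def delete_repeated(coordinates_array_2d):
--     final=[]
--     flag=0
--     flag2=0
--     for a in coordinates_array_2d:
--         if(flag==0):
--             final.append(a)
--             flag=1
--         else:
--             flag2=0
--             for x in final:
--                 if((abs(x[0]-a[0])>3 ) or (abs(x[1]-a[1])>3 ) ):
--                     continue
--                 else:
--                     flag2=1
--                     break
--             if(flag2==0):
--                     final.append(a)
--     return(final)
-- ===== SOURCE B (Python) =====
-- def delete_repeated(coordinates_array_2d):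
--     # Spatial hash grid with cell width 4: any two points in the same cell are
--     # within 3 in both coordinates, so each cell holds at most one accepted
--     # point, and only the 9 surrounding cells can contain a conflicting point.
--     grid = {}
--     final = []
--     for p in coordinates_array_2d:
--         cx, cy = p[0] // 4, p[1] // 4
--         ok = True
--         for dx in (-1, 0, 1):
--             for dy in (-1, 0, 1):
--                 q = grid.get((cx + dx, cy + dy))
--                 if q is not None and abs(q[0] - p[0]) <= 3 and abs(q[1] - p[1]) <= 3:
--                     ok = False
--                     break
--             if not ok:
--                 break
--         if ok:
--             grid[(cx, cy)] = p
--             final.append(p)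
--     return final
-- ===== Notes on version B (the rewrite author's own statement) =====
-- stated objective: alternative
-- what changed: A checks each point against every previously accepted point (nested scan over the output list); B instead maintains a spatial hash grid with cell width 4 (each cell holds at most one accepted point) and checks only the 9 neighbouring cells of the new point.
-- outside the precondition, e.g. on delete_repeated([[5]]): A returns [[5]], B raises IndexError; on delete_repeated([[0, 0], [10]]): A returns [[0, 0], [10]], B raises IndexError
import Mathlib
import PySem

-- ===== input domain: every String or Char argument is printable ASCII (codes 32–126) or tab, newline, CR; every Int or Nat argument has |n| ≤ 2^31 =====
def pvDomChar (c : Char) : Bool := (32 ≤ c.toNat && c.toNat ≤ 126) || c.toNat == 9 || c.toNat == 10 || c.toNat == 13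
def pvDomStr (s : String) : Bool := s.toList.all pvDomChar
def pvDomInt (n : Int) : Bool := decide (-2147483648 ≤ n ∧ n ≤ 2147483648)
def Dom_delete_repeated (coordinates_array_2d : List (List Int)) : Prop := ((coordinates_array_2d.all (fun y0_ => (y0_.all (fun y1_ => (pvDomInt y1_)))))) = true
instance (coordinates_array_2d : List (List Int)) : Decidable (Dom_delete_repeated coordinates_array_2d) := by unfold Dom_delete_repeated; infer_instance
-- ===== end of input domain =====

-- B replaces A's scan of all accepted points by a spatial hash grid
-- (cell width 4, at most one accepted point per cell, 9 neighbour cells checked).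

-- l[i] on the stated Pre_ domain (all inner lists have length ≥ 2, indices 0/1 in range)
def pvG (l : List Int) (i : Int) : Int := PySem.List.pyGetD l i 0

-- ===== PORT A =====
-- inner 'for x in final: … break' loop of A
def pvInnerA : List (List Int) → List Int → Int
  | [], _ => 0
  | x :: rest, a =>
    if |pvG x 0 - pvG a 0| > 3 ∨ |pvG x 1 - pvG a 1| > 3 then pvInnerA rest a else 1

def pvStepA (st : List (List Int) × Int) (a : List Int) : List (List Int) × Int :=
  if st.2 == 0 then (st.1 ++ [a], 1)
  else if pvInnerA st.1 a == 0 then (st.1 ++ [a], st.2) else st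

def delete_repeated (coordinates_array_2d : List (List Int)) : List (List Int) :=
  (coordinates_array_2d.foldl pvStepA ([], 0)).1

-- ===== PORT B =====
def pvCell (p : List Int) : Int × Int :=
  (PySem.Int.floordiv (pvG p 0) 4, PySem.Int.floordiv (pvG p 1) 4)

def pvCloseB (q p : List Int) : Bool :=
  decide (|pvG q 0 - pvG p 0| ≤ 3) && decide (|pvG q 1 - pvG p 1| ≤ 3)

-- the double loop over the 9 neighbour cells (early break ≡ List.any)
def pvNeighClose (grid : PySem.Dict (Int × Int) (List Int)) (c : Int × Int) (p : List Int) : Bool :=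
  ([-1, 0, 1] : List Int).any fun dx =>
    ([-1, 0, 1] : List Int).any fun dy =>
      match grid.get? (c.1 + dx, c.2 + dy) with
      | some q => pvCloseB q p
      | none => false

def pvStepB (st : PySem.Dict (Int × Int) (List Int) × List (List Int)) (p : List Int) :
    PySem.Dict (Int × Int) (List Int) × List (List Int) :=
  if pvNeighClose st.1 (pvCell p) p then st else (st.1.insert (pvCell p) p, st.2 ++ [p])

def delete_repeated_alt (coordinates_array_2d : List (List Int)) : List (List Int) :=
  (coordinates_array_2d.foldl pvStepB (PySem.Dict.empty, [])).2

-- ===== PRECONDITION & SPEC =====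
-- Pre_ excludes inputs containing an inner list of length < 2: there Python B raises
-- IndexError, and Python A raises IndexError on most of them as well.
def Pre_delete_repeated (coordinates_array_2d : List (List Int)) : Prop :=
  ∀ l ∈ coordinates_array_2d, 2 ≤ l.length

instance (coordinates_array_2d : List (List Int)) : Decidable (Pre_delete_repeated coordinates_array_2d) := by
  unfold Pre_delete_repeated; infer_instance

def pvWitness_delete_repeated : List (List Int) := [[0, 0], [10, 0], [1, 1]]

def Spec_delete_repeated (coordinates_array_2d : List (List Int)) (out : List (List Int)) : Prop := out = delete_repeated_alt coordinates_array_2d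
instance (coordinates_array_2d : List (List Int)) (out : List (List Int)) : Decidable (Spec_delete_repeated coordinates_array_2d out) := by unfold Spec_delete_repeated; infer_instance

-- ===== CLAIM (what is proved, stated in full; the proofs are below) =====
def Claim_equal_delete_repeated : Prop := ∀ (coordinates_array_2d : List (List Int)), Dom_delete_repeated coordinates_array_2d → Pre_delete_repeated coordinates_array_2d → Spec_delete_repeated coordinates_array_2d (delete_repeated coordinates_array_2d)

-- ===== LEMMAS AND PROOFS =====

-- the ports agree on ALL inputs (Pre_ is needed only for fidelity to the Python,
-- whose indexing raises outside it), so the lemmas do not mention Pre_.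

def pvClose (q p : List Int) : Prop :=
  |pvG q 0 - pvG p 0| ≤ 3 ∧ |pvG q 1 - pvG p 1| ≤ 3

lemma pvCloseB_iff (q p : List Int) : pvCloseB q p = true ↔ pvClose q p := by
  simp [pvCloseB, pvClose]

lemma pvInnerA_eq_zero_iff (final : List (List Int)) (a : List Int) :
    pvInnerA final a = 0 ↔ ∀ q ∈ final, ¬ pvClose q a := by
  induction final with
  | nil => simp [pvInnerA]
  | cons x rest ih =>
    by_cases h : |pvG x 0 - pvG a 0| > 3 ∨ |pvG x 1 - pvG a 1| > 3
    · have hx : ¬ pvClose x a := by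
        rintro ⟨h1, h2⟩
        rcases h with h | h
        · exact absurd h1 (by omega)
        · exact absurd h2 (by omega)
      simp only [pvInnerA, if_pos h, ih, List.forall_mem_cons]
      exact ⟨fun hr => ⟨hx, hr⟩, fun hr => hr.2⟩
    · have hx : pvClose x a := by
        push Not at h
        exact ⟨h.1, h.2⟩
      simp only [pvInnerA, if_neg h]
      constructor
      · intro h1; exact absurd h1 (by decide)
      · intro hall; exact (hall x (by simp) hx).elim

lemma pv_fdiv_close {u v : Int} (h : PySem.Int.floordiv u 4 = PySem.Int.floordiv v 4) :
    |u - v| ≤ 3 := by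
  rw [PySem.Int.floordiv_eq_ediv_of_pos (by omega), PySem.Int.floordiv_eq_ediv_of_pos (by omega)] at h
  rw [abs_le]
  omega

lemma pv_fdiv_near {u v : Int} (h : |u - v| ≤ 3) :
    |PySem.Int.floordiv u 4 - PySem.Int.floordiv v 4| ≤ 1 := by
  rw [abs_le] at h ⊢
  rw [PySem.Int.floordiv_eq_ediv_of_pos (by omega), PySem.Int.floordiv_eq_ediv_of_pos (by omega)]
  omega

def pvInv (final : List (List Int)) (grid : PySem.Dict (Int × Int) (List Int)) : Prop :=
  (∀ k q, grid.get? k = some q → q ∈ final) ∧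
  (∀ q ∈ final, grid.get? (pvCell q) = some q)

lemma pvNeigh_iff (final : List (List Int)) (grid : PySem.Dict (Int × Int) (List Int))
    (p : List Int) (hInv : pvInv final grid) :
    pvNeighClose grid (pvCell p) p = true ↔ ∃ q ∈ final, pvClose q p := by
  constructor
  · intro h
    simp only [pvNeighClose, List.any_eq_true] at h
    obtain ⟨dx, _, dy, _, hm⟩ := h
    cases hq : grid.get? ((pvCell p).1 + dx, (pvCell p).2 + dy) with
    | none => rw [hq] at hm; simp at hm
    | some q =>
      rw [hq] at hm
      exact ⟨q, hInv.1 _ q hq, (pvCloseB_iff q p).mp hm⟩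
  · rintro ⟨q, hq, hcl⟩
    have hg := hInv.2 q hq
    have h1 := pv_fdiv_near hcl.1
    have h2 := pv_fdiv_near hcl.2
    simp only [pvNeighClose, List.any_eq_true]
    have h1' := abs_le.mp h1
    have h2' := abs_le.mp h2
    refine ⟨(pvCell q).1 - (pvCell p).1,
            by simp only [pvCell, List.mem_cons, List.not_mem_nil, or_false]; omega,
            (pvCell q).2 - (pvCell p).2,
            by simp only [pvCell, List.mem_cons, List.not_mem_nil, or_false]; omega, ?_⟩
    have hk : ((pvCell p).1 + ((pvCell q).1 - (pvCell p).1),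
               (pvCell p).2 + ((pvCell q).2 - (pvCell p).2)) = pvCell q := by
      apply Prod.ext <;> simp
    rw [hk, hg]
    exact (pvCloseB_iff q p).mpr hcl

lemma pvInv_insert (final : List (List Int)) (grid : PySem.Dict (Int × Int) (List Int))
    (a : List Int) (hInv : pvInv final grid) (hnc : ∀ q ∈ final, ¬ pvClose q a) :
    pvInv (final ++ [a]) (grid.insert (pvCell a) a) := by
  constructor
  · intro k q hq
    rw [PySem.Dict.get?_insert] at hq
    by_cases hk : k = pvCell a
    · simp [hk] at hq; simp [hq]
    · simp [hk] at hq
      exact List.mem_append_left _ (hInv.1 k q hq)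
  · intro q hq
    rcases List.mem_append.mp hq with h | h
    · have hne : pvCell q ≠ pvCell a := by
        intro he
        apply hnc q h
        have he1 : (pvCell q).1 = (pvCell a).1 := by rw [he]
        have he2 : (pvCell q).2 = (pvCell a).2 := by rw [he]
        simp only [pvCell] at he1 he2
        exact ⟨pv_fdiv_close he1, pv_fdiv_close he2⟩
      rw [PySem.Dict.get?_insert_of_ne _ _ hne]
      exact hInv.2 q h
    · simp at h; subst h
      exact PySem.Dict.get?_insert_self _ _ _

lemma pv_loop_eq : ∀ (cs final : List (List Int)) (flag : Int)
    (grid : PySem.Dict (Int × Int) (List Int)),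
    pvInv final grid → (flag = 0 ↔ final = []) →
    (cs.foldl pvStepA (final, flag)).1 = (cs.foldl pvStepB (grid, final)).2 := by
  intro cs
  induction cs with
  | nil => intro final flag grid _ _; rfl
  | cons a rest ih =>
    intro final flag grid hInv hflag
    simp only [List.foldl_cons]
    by_cases hc : ∃ q ∈ final, pvClose q a
    · -- rejected by both
      have hne : final ≠ [] := by
        obtain ⟨q, hq, _⟩ := hc
        intro h; subst h; simp at hq
      have hfl : flag ≠ 0 := fun h => hne (hflag.mp h)
      have hA : pvStepA (final, flag) a = (final, flag) := by
        have hi : pvInnerA final a ≠ 0 := by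
          rw [Ne, pvInnerA_eq_zero_iff]
          push Not
          exact hc
        simp [pvStepA, hfl, hi]
      have hB : pvStepB (grid, final) a = (grid, final) := by
        simp [pvStepB, (pvNeigh_iff final grid a hInv).mpr hc]
      rw [hA, hB]
      exact ih final flag grid hInv hflag
    · -- accepted by both
      push Not at hc
      have hB : pvStepB (grid, final) a = (grid.insert (pvCell a) a, final ++ [a]) := by
        have : pvNeighClose grid (pvCell a) a = false := by
          rw [← Bool.not_eq_true, pvNeigh_iff final grid a hInv]
          push Not
          exact hc
        simp [pvStepB, this]
      have hInv' := pvInv_insert final grid a hInv hc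
      have hnil : (final ++ [a] = []) ↔ False := by simp
      by_cases hf : flag = 0
      · have hA : pvStepA (final, flag) a = (final ++ [a], 1) := by simp [pvStepA, hf]
        rw [hA, hB]
        exact ih (final ++ [a]) 1 _ hInv' (by simp)
      · have hi : pvInnerA final a = 0 := (pvInnerA_eq_zero_iff final a).mpr hc
        have hA : pvStepA (final, flag) a = (final ++ [a], flag) := by
          simp [pvStepA, hf, hi]
        rw [hA, hB]
        exact ih (final ++ [a]) flag _ hInv' (by simp [hf])

-- ===== VERDICT (by name: the statement is the Claim_ definition above) =====
theorem delete_repeated_spec : Claim_equal_delete_repeated := by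
  intro cs _ _
  unfold Spec_delete_repeated delete_repeated delete_repeated_alt
  exact pv_loop_eq cs [] 0 PySem.Dict.empty
    ⟨fun k q hq => by simp [PySem.Dict.get?_empty] at hq, fun q hq => by simp at hq⟩
    (by simp)
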